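-- pv_equiv track=rewrite | github.com/vulnz/dominator | modules/business_logic/module.py | _is_business_endpoint
-- ===== SOURCE A (Python) =====
-- def _is_business_endpoint(url: str) -> bool:
--     """Check if endpoint handles business logic"""
--     patterns = [
--         '/cart', '/checkout', '/order', '/payment', '/purchase',
--         '/product', '/item', '/booking', '/reservation',
--         '/transfer', '/send', '/api/', '/buy', '/sell'
--     ]
--     url_lower = url.lower()
--     return any(p in url_lower for p in patterns)
-- ===== SOURCE B (Python) =====
-- def _is_business_endpoint(url: str) -> bool:
--     """Check if endpoint handles business logic"""
--     patterns = (
--         '/cart', '/checkout', '/order', '/payment', '/purchase',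
--         '/product', '/item', '/booking', '/reservation',
--         '/transfer', '/send', '/api/', '/buy', '/sell'
--     )
--     u = url.lower()
--     for i in range(len(u)):
--         if u[i] == '/' and u.startswith(patterns, i):
--             return True
--     return False
-- ===== Notes on version B (the rewrite author's own statement) =====
-- stated objective: alternative
-- what changed: Replaces 14 independent substring scans (any(p in url_lower for p in patterns)) with a single left-to-right pass over the lowered URL that, at each slash character, tests the patterns as prefixes of the remaining suffix (tuple-startswith anchored at position i), returning True at the first hit.
import Mathlib
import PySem

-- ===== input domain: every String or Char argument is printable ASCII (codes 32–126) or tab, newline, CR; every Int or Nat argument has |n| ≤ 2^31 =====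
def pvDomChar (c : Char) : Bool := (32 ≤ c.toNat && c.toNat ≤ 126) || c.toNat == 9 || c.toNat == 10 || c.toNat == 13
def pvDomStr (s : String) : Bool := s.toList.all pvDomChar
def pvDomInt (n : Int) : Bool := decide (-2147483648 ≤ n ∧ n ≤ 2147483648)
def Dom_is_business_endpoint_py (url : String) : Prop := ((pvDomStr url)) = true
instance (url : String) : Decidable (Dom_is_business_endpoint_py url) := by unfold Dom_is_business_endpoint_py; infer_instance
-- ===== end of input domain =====

-- ===== PORT A =====
-- B replaces 14 independent substring scans with one left-to-right pass testing the
-- patterns as anchored prefixes at each '/'; objective: alternative (same result, same cost class).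
def is_business_endpoint_py (url : String) : Bool :=
  let patterns : List String :=
    ["/cart", "/checkout", "/order", "/payment", "/purchase",
     "/product", "/item", "/booking", "/reservation",
     "/transfer", "/send", "/api/", "/buy", "/sell"]
  let url_lower := PySem.Str.lower url
  patterns.any (fun p => PySem.Str.isIn p url_lower)

-- ===== PORT B =====
def bizPatterns : List (List Char) :=
  ["/cart".toList, "/checkout".toList, "/order".toList, "/payment".toList, "/purchase".toList,
   "/product".toList, "/item".toList, "/booking".toList, "/reservation".toList,
   "/transfer".toList, "/send".toList, "/api/".toList, "/buy".toList, "/sell".toList]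

-- the loop "for i in range(len(u)): if u[i]=='/' and u.startswith(patterns, i)" as
-- structural recursion over the suffixes of u
def bizScan : List Char → Bool
  | [] => false
  | c :: rest =>
      if c == '/' && bizPatterns.any (fun p => PySem.Chars.startswith (c :: rest) p) then true
      else bizScan rest

def is_business_endpoint_py_alt (url : String) : Bool :=
  bizScan (PySem.Chars.lower url.toList)

-- ===== PRECONDITION & SPEC =====
def Spec_is_business_endpoint_py (url : String) (out : Bool) : Prop := out = is_business_endpoint_py_alt url
instance (url : String) (out : Bool) : Decidable (Spec_is_business_endpoint_py url out) := by unfold Spec_is_business_endpoint_py; infer_instance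

-- ===== CLAIM (what is proved, stated in full; the proofs are below) =====
def Claim_equal_is_business_endpoint_py : Prop := ∀ (url : String), Dom_is_business_endpoint_py url → Spec_is_business_endpoint_py url (is_business_endpoint_py url)

-- ===== LEMMAS AND PROOFS =====

theorem bizPatterns_head : ∀ p ∈ bizPatterns, p.head? = some '/' := by decide

theorem bizScan_iff (s : List Char) :
    bizScan s = true ↔ ∃ p ∈ bizPatterns, p <:+: s := by
  induction s with
  | nil =>
      simp only [bizScan]
      constructor
      · intro h; simp at h
      · rintro ⟨p, hp, hinf⟩
        have hnil : p = [] := List.eq_nil_of_infix_nil hinf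
        have hh := bizPatterns_head p hp
        rw [hnil] at hh; simp at hh
  | cons c rest ih =>
      simp only [bizScan]
      constructor
      · intro h
        split_ifs at h with hc
        · rcases Bool.and_eq_true_iff.mp hc with ⟨_, hany⟩
          rcases List.any_eq_true.mp hany with ⟨p, hp, hsw⟩
          exact ⟨p, hp, ((PySem.Chars.startswith_iff _ _).mp hsw).isInfix⟩
        · rcases ih.mp h with ⟨p, hp, hinf⟩
          exact ⟨p, hp, hinf.trans (List.suffix_cons c rest).isInfix⟩
      · rintro ⟨p, hp, hinf⟩
        rcases List.infix_cons_iff.mp hinf with hpre | hinf'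
        · rcases p with _ | ⟨a, t0⟩
          · exact absurd (bizPatterns_head _ hp) (by simp)
          · have ha : a = '/' := by
              have hh := bizPatterns_head _ hp; simpa using hh
            rcases List.cons_prefix_cons.mp hpre with ⟨hac, _⟩
            have hcond : (c == '/' && bizPatterns.any
                (fun p => PySem.Chars.startswith (c :: rest) p)) = true := by
              refine Bool.and_eq_true_iff.mpr ⟨by simp [← hac, ha], ?_⟩
              exact List.any_eq_true.mpr
                ⟨a :: t0, hp, (PySem.Chars.startswith_iff _ _).mpr hpre⟩
            simp [hcond]
        · have hr := ih.mpr ⟨p, hp, hinf'⟩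
          split_ifs
          · rfl
          · exact hr

-- ===== VERDICT (by name: the statement is the Claim_ definition above) =====
theorem is_business_endpoint_py_spec : Claim_equal_is_business_endpoint_py := by
  intro url _
  unfold Spec_is_business_endpoint_py is_business_endpoint_py is_business_endpoint_py_alt
  rw [Bool.eq_iff_iff, bizScan_iff]
  simp [bizPatterns, PySem.Chars.isIn_iff_infix]
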